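-- pv_equiv track=rewrite | github.com/KubinGH/logia-tryhard-saga | Ye Olde/Etap 3/2013/1.py | kulki
-- ===== SOURCE A (Python) =====
-- def cycle_nelems(items, count):
--     result = []
--     count = list(count)
--     current = 0
--     while any(count):
--         if count[current]:
--             result.append(items[current])
--             count[current] -= 1
--         current = (current + 1) % len(items)
--     return result
--
-- def non_matching_idx(first_arr, second_arr):
--     result = []
--     for i, items in enumerate(zip(first_arr, second_arr)):
--         if items[0] != items[1]: result.append(i)
--     return result
--
-- def kulki(arrangement):
--     red, green = "c", "z"
--     start_arr = [ch for ch in arrangement]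
--     arr_len = len(start_arr)
--
--     count = {}
--     count[red] = start_arr.count(red)
--     count[green] = arr_len - count[red]
--
--     final_arr = cycle_nelems((red, green), (count[red], count[green]))
--     to_replace = non_matching_idx(start_arr, final_arr)
--
--     return len(to_replace) // 2
-- ===== SOURCE B (Python) =====
-- def kulki(arrangement):
--     red = arrangement.count('c')
--     green = len(arrangement) - red
--     m = min(red, green)
--     surplus = 'c' if red > green else 'z'
--     bad = 0
--     for i, ch in enumerate(arrangement):
--         expected = ('c' if i % 2 == 0 else 'z') if i < 2 * m else surplus
--         if ch != expected:
--             bad += 1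
--     return bad // 2
-- ===== Notes on version B (the rewrite author's own statement) =====
-- stated objective: simpler
-- what changed: B drops A's round-robin construction of the target list and the separate non-matching-index list: it counts the red characters once and makes a single pass over the string, comparing each character to an inline expected character computed from its index (alternating colours below twice the smaller count, the surplus colour above), counting mismatches and returning half that count; avoiding all intermediate list building gives a constant-factor speedup.
import Mathlib
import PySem

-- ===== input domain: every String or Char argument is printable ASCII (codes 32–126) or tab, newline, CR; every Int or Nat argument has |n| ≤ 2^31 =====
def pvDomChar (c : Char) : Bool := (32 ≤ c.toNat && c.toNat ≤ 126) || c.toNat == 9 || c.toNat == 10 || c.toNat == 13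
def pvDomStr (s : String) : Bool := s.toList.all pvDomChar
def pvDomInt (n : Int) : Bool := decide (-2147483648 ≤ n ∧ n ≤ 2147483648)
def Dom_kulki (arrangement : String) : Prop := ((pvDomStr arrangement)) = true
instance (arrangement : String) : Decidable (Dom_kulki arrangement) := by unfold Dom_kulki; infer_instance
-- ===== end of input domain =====

-- B replaces A's round-robin target-list construction and index-collection passes by a
-- single counting pass with an inline expected-char formula (objective: simpler).

-- ===== PORT A =====
-- cycle_nelems specialized to its only call: items = ('c','z') as (a,b); current = (current+1) % 2
def cycleNelems (a b : Char) (c0 c1 : Nat) (current : Nat) : List Char :=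
  if c0 = 0 ∧ c1 = 0 then []          -- while any(count)
  else if current = 0 then
    if c0 = 0 then cycleNelems a b c0 c1 1
    else a :: cycleNelems a b (c0 - 1) c1 1
  else
    if c1 = 0 then cycleNelems a b c0 c1 0
    else b :: cycleNelems a b c0 (c1 - 1) 0
termination_by 2 * (c0 + c1) + (if (if current = 0 then c0 else c1) = 0 then 1 else 0)
decreasing_by all_goals (first | (simp_all; split_ifs <;> omega) | simp_all)

-- the loop body of non_matching_idx ('if items[0] != items[1]: result.append(i)')
def nmiStep (result : List Int) (p : Int × Char × Char) : List Int :=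
  if p.2.1 ≠ p.2.2 then result ++ [p.1] else result

def nonMatchingIdx (firstArr secondArr : List Char) : List Int :=
  (PySem.List.enumerate (firstArr.zip secondArr) 0).foldl nmiStep []

def kulki (arrangement : String) : Int :=
  let startArr := arrangement.toList
  let arrLen := startArr.length
  let countRed := startArr.count 'c'
  let countGreen := arrLen - countRed
  let finalArr := cycleNelems 'c' 'z' countRed countGreen 0
  let toReplace := nonMatchingIdx startArr finalArr
  PySem.Int.floordiv (toReplace.length : Int) 2

-- ===== PORT B =====
-- the loop body of B: compare ch with the inline expected char, count mismatches
def bStep (m : Nat) (surplus : Char) (acc : Int) (p : Int × Char) : Int :=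
  if p.2 ≠ (if p.1 < ((2 * m : Nat) : Int) then (if p.1 % 2 = 0 then 'c' else 'z') else surplus)
  then acc + 1 else acc

def kulki_alt (arrangement : String) : Int :=
  let s := arrangement.toList
  let red := s.count 'c'
  let green := s.length - red
  let m := min red green
  let surplus : Char := if green < red then 'c' else 'z'
  let bad : Int := (PySem.List.enumerate s 0).foldl (bStep m surplus) 0
  PySem.Int.floordiv bad 2

-- ===== PRECONDITION & SPEC =====
def Spec_kulki (arrangement : String) (out : Int) : Prop := out = kulki_alt arrangement
instance (arrangement : String) (out : Int) : Decidable (Spec_kulki arrangement out) := by unfold Spec_kulki; infer_instance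

-- ===== CLAIM (what is proved, stated in full; the proofs are below) =====
def Claim_equal_kulki : Prop := ∀ (arrangement : String), Dom_kulki arrangement → Spec_kulki arrangement (kulki arrangement)

-- ===== LEMMAS AND PROOFS =====

-- the expected character at position i for m interleaved pairs and surplus sur
def expChar (m : Nat) (sur : Char) (i : Nat) : Char :=
  if i < 2 * m then (if i % 2 = 0 then 'c' else 'z') else sur

theorem cyc_left (a b : Char) : ∀ (c1 cur : Nat), cycleNelems a b 0 c1 cur = List.replicate c1 b := by
  intro c1
  induction c1 with
  | zero => intro cur; rw [cycleNelems]; simp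
  | succ n ih =>
    have h1 : cycleNelems a b 0 (n + 1) 1 = List.replicate (n + 1) b := by
      rw [cycleNelems]; simp [ih 0, List.replicate_succ]
    intro cur
    by_cases hc : cur = 0
    · subst hc; rw [cycleNelems]; simpa using h1
    · rw [cycleNelems]; simp [hc, ih 0, List.replicate_succ]

theorem cyc_right (a b : Char) : ∀ (c0 cur : Nat), cycleNelems a b c0 0 cur = List.replicate c0 a := by
  intro c0
  induction c0 with
  | zero => intro cur; rw [cycleNelems]; simp
  | succ n ih =>
    have h0 : cycleNelems a b (n + 1) 0 0 = List.replicate (n + 1) a := by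
      rw [cycleNelems]; simp [ih 1, List.replicate_succ]
    intro cur
    by_cases hc : cur = 0
    · subst hc; exact h0
    · rw [cycleNelems]; simpa [hc] using h0

theorem cyc_cons (a b : Char) (p q : Nat) :
    cycleNelems a b (p + 1) (q + 1) 0 = a :: b :: cycleNelems a b p q 0 := by
  rw [cycleNelems]; simp; rw [cycleNelems]; simp

theorem expChar_shift (m : Nat) (sur : Char) (i : Nat) :
    expChar (m + 1) sur (2 + i) = expChar m sur i := by
  unfold expChar
  have h1 : (2 + i < 2 * (m + 1)) = (i < 2 * m) := by
    apply propext; omega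
  have h2 : (2 + i) % 2 = i % 2 := by omega
  simp only [h1, h2]

theorem range_map_const (n : Nat) (c : Char) (f : Nat → Char) (h : ∀ i ∈ List.range n, f i = c) :
    (List.range n).map f = List.replicate n c := by
  rw [List.map_congr_left h]
  simp [List.map_const']

theorem cyc_closed : ∀ (r g : Nat),
    cycleNelems 'c' 'z' r g 0 =
      (List.range (r + g)).map (expChar (min r g) (if g < r then 'c' else 'z')) := by
  intro r
  induction r with
  | zero =>
    intro g
    rw [cyc_left]
    have hm : min 0 g = 0 := by omega
    rw [hm, if_neg (Nat.not_lt_zero g), Nat.zero_add,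
      range_map_const g 'z' _ (fun i _ => by simp [expChar])]
  | succ s ih =>
    intro g
    cases g with
    | zero =>
      rw [cyc_right]
      have hsur : (if 0 < s + 1 then ('c' : Char) else 'z') = 'c' := if_pos (Nat.succ_pos s)
      rw [hsur, range_map_const (s + 1 + 0) 'c' _ (fun i _ => by simp [expChar])]
    | succ t =>
      rw [cyc_cons, ih t]
      have hmin : min (s + 1) (t + 1) = min s t + 1 := by omega
      have hsur : (if t + 1 < s + 1 then ('c' : Char) else 'z') = (if t < s then 'c' else 'z') := by
        by_cases h : t < s <;> simp [h]
      rw [hmin, hsur]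
      have hn : s + 1 + (t + 1) = 2 + (s + t) := by omega
      have hsplit : List.range (2 + (s + t)) = List.range 2 ++ (List.range (s + t)).map (2 + ·) := by
        rw [List.range_add]
      rw [hn, hsplit, List.map_append, List.map_map]
      have hr2 : (List.range 2).map (expChar (min s t + 1) (if t < s then 'c' else 'z')) = ['c', 'z'] := by
        have e0 : expChar (min s t + 1) (if t < s then 'c' else 'z') 0 = 'c' := by
          unfold expChar; rw [if_pos (by omega), if_pos (by omega)]
        have e1 : expChar (min s t + 1) (if t < s then 'c' else 'z') 1 = 'z' := by
          unfold expChar; rw [if_pos (by omega), if_neg (by omega)]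
        simp [List.range_succ, e0, e1]
      rw [hr2]
      have hsh : (List.range (s + t)).map (expChar (min s t + 1) (if t < s then 'c' else 'z') ∘ (2 + ·)) =
          (List.range (s + t)).map (expChar (min s t) (if t < s then 'c' else 'z')) :=
        List.map_congr_left (fun i _ => expChar_shift _ _ i)
      rw [hsh]
      rfl

theorem nmi_foldl_len : ∀ (l : List (Int × Char × Char)) (acc : List Int),
    (l.foldl nmiStep acc).length = acc.length + l.countP (fun p => p.2.1 != p.2.2) := by
  intro l
  induction l with
  | nil => intro acc; simp
  | cons x xs ih =>
    intro acc
    rw [List.foldl_cons, List.countP_cons, ih]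
    by_cases h : x.2.1 = x.2.2
    · rw [show nmiStep acc x = acc from if_neg (by simp [h])]
      simp [h]
    · rw [show nmiStep acc x = acc ++ [x.1] from if_pos h]
      simp [h]
      omega

theorem nmi_len (xs ys : List Char) :
    (nonMatchingIdx xs ys).length = (xs.zip ys).countP (fun p => p.1 != p.2) := by
  unfold nonMatchingIdx
  rw [nmi_foldl_len]
  conv_rhs => rw [← PySem.List.map_snd_enumerate (xs.zip ys) 0]
  rw [List.countP_map]
  simp only [List.length_nil, Nat.zero_add]
  rfl

theorem bStep_eq (m : Nat) (sur : Char) (acc : Int) (k : Nat) (ch : Char) :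
    bStep m sur acc ((k : Int), ch) = if ch ≠ expChar m sur k then acc + 1 else acc := by
  unfold bStep expChar
  have h1 : ((k : Int) < ((2 * m : Nat) : Int)) = (k < 2 * m) := by
    apply propext; exact_mod_cast Iff.rfl
  have h2 : ((k : Int) % 2 = 0) = (k % 2 = 0) := by
    apply propext; omega
  simp only [h1, h2]

theorem bloop : ∀ (s : List Char) (k : Nat) (acc : Int) (m : Nat) (sur : Char),
    ((PySem.List.enumerate s (k : Int)).foldl (bStep m sur) acc) =
      acc + ((s.zip ((List.range' k s.length).map (expChar m sur))).countP (fun p => p.1 != p.2) : Int) := by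
  intro s
  induction s with
  | nil => intro k acc m sur; simp [PySem.List.enumerate]
  | cons ch t ih =>
    intro k acc m sur
    rw [PySem.List.enumerate_cons, List.foldl_cons, bStep_eq]
    have hk : ((k : Int) + 1) = ((k + 1 : Nat) : Int) := by push_cast; ring
    rw [hk, ih]
    simp only [List.length_cons, List.range'_succ, List.map_cons, List.zip_cons_cons,
      List.countP_cons]
    by_cases h : ch = expChar m sur k
    · rw [if_neg (by simp [h])]
      simp [h]
    · rw [if_pos h]
      simp only [bne_iff_ne, ne_eq, h, not_false_eq_true, if_true]
      push_cast
      ring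

-- ===== VERDICT (by name: the statement is the Claim_ definition above) =====
theorem kulki_spec : Claim_equal_kulki := by
  intro arrangement _
  unfold Spec_kulki kulki kulki_alt
  simp only []
  set s := arrangement.toList with hs
  have hle : s.count 'c' ≤ s.length := List.count_le_length
  have hgr : s.count 'c' + (s.length - s.count 'c') = s.length := by omega
  congr 1
  rw [nmi_len, cyc_closed, hgr, List.range_eq_range']
  have hb := bloop s 0 0 (min (s.count 'c') (s.length - s.count 'c'))
      (if s.length - s.count 'c' < s.count 'c' then 'c' else 'z')
  simp only [Nat.cast_zero] at hb
  rw [hb]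
  simp
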